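-- pv_equiv track=rewrite | github.com/endvater/finreg-agents | app.py | _extract_timeline
-- ===== SOURCE A (Python) =====
-- def _extract_timeline(logs: list[str]) -> list[dict]:
--     events = []
--     for line in logs:
--         msg = line.strip()
--         icon = "ℹ️"
--         if "Schritt 1/4" in msg:
--             icon = "📂"
--         elif "Schritt 2/4" in msg:
--             icon = "🔍"
--         elif "Schritt 3/4" in msg:
--             icon = "📋"
--         elif "Schritt 4/4" in msg:
--             icon = "📝"
--         elif "REVIEW" in msg:
--             icon = "🔎"
--         elif "Skeptiker" in msg:
--             icon = "⚔️"
--         elif "abgeschlossen" in msg: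
--             icon = "✅"
--         events.append({"icon": icon, "message": msg})
--     return events[-40:]
-- ===== SOURCE B (Python) =====
-- _TABLE = [
--     ("Schritt 1/4", "\U0001F4C2"),
--     ("Schritt 2/4", "\U0001F50D"),
--     ("Schritt 3/4", "\U0001F4CB"),
--     ("Schritt 4/4", "\U0001F4DD"),
--     ("REVIEW", "\U0001F50E"),
--     ("Skeptiker", "\u2694\uFE0F"),
--     ("abgeschlossen", "\u2705"),
-- ]
--
-- def _extract_timeline(logs: list[str]) -> list[dict]:
--     # Walk the logs backwards, collecting at most 40 events, then reverse:
--     # lines older than the last 40 are never touched.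
--     events = []
--     for line in reversed(logs):
--         if len(events) == 40:
--             break
--         msg = line.strip()
--         for pat, icon in _TABLE:
--             if pat in msg:
--                 break
--         else:
--             icon = "\u2139\uFE0F"
--         events.append({"icon": icon, "message": msg})
--     events.reverse()
--     return events
-- ===== Notes on version B (the rewrite author's own statement) =====
-- stated objective: faster
-- what changed: B traverses the log list backwards with an early break once 40 events are collected, classifies each line by a first-match scan over an ordered (pattern, icon) table, and reverses the accumulated events at the end, instead of A's forward full pass through an if/elif cascade followed by a [-40:] slice.
import Mathlib
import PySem

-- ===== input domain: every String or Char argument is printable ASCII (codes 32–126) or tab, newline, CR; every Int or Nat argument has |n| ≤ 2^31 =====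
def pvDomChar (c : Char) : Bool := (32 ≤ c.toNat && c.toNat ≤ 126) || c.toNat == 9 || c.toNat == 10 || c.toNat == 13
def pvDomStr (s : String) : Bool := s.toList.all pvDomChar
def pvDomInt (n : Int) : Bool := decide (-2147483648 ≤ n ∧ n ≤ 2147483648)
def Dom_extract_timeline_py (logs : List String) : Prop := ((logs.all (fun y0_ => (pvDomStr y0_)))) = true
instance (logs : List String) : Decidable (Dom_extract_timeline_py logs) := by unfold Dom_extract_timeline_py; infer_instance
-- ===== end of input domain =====

-- B walks the logs backwards, stops after collecting 40 events, classifies by a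
-- first-match table scan and reverses at the end, instead of A's forward full pass
-- through an if/elif cascade followed by a [-40:] slice (objective: faster, constant-factor).

-- ===== PORT A =====
def extract_timeline_py (logs : List String) : List (List (String × String)) :=
  let events : List (List (String × String)) :=
    logs.foldl (fun events line =>
      let msg := PySem.Str.strip line
      let icon := "ℹ️"
      let icon :=
        if PySem.Str.isIn "Schritt 1/4" msg then "📂"
        else if PySem.Str.isIn "Schritt 2/4" msg then "🔍"
        else if PySem.Str.isIn "Schritt 3/4" msg then "📋"
        else if PySem.Str.isIn "Schritt 4/4" msg then "📝"
        else if PySem.Str.isIn "REVIEW" msg then "🔎"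
        else if PySem.Str.isIn "Skeptiker" msg then "⚔️"
        else if PySem.Str.isIn "abgeschlossen" msg then "✅"
        else icon
      events ++ [[("icon", icon), ("message", msg)]]) []
  PySem.List.slice events (some (-40)) none

-- ===== PORT B =====
def pvTable : List (String × String) :=
  [("Schritt 1/4", "📂"), ("Schritt 2/4", "🔍"), ("Schritt 3/4", "📋"),
   ("Schritt 4/4", "📝"), ("REVIEW", "🔎"), ("Skeptiker", "⚔️"), ("abgeschlossen", "✅")]

-- inner 'for pat, icon in _TABLE: if pat in msg: break / else: icon = "ℹ️"'
def pvIconFind (msg : String) : List (String × String) → String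
  | [] => "ℹ️"
  | (pat, icon) :: rest => if PySem.Str.isIn pat msg then icon else pvIconFind msg rest

-- the backwards loop with 'if len(events) == 40: break'
def pvCollect : List String → List (List (String × String)) → List (List (String × String))
  | [], events => events
  | line :: rest, events =>
    if events.length = 40 then events
    else
      let msg := PySem.Str.strip line
      pvCollect rest (events ++ [[("icon", pvIconFind msg pvTable), ("message", msg)]])

def extract_timeline_py_alt (logs : List String) : List (List (String × String)) :=
  (pvCollect logs.reverse []).reverse

-- ===== PRECONDITION & SPEC =====
def Spec_extract_timeline_py (logs : List String) (out : List (List (String × String))) : Prop := out = extract_timeline_py_alt logs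
instance (logs : List String) (out : List (List (String × String))) : Decidable (Spec_extract_timeline_py logs out) := by unfold Spec_extract_timeline_py; infer_instance

-- ===== CLAIM (what is proved, stated in full; the proofs are below) =====
def Claim_equal_extract_timeline_py : Prop := ∀ (logs : List String), Dom_extract_timeline_py logs → Spec_extract_timeline_py logs (extract_timeline_py logs)

-- ===== LEMMAS AND PROOFS =====

-- the per-line event both programs build
def pvLine (line : String) : List (String × String) :=
  let msg := PySem.Str.strip line
  [("icon", pvIconFind msg pvTable), ("message", msg)]

theorem pvCollect_eq (xs : List String) (ev : List (List (String × String))) (h : ev.length ≤ 40) :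
    pvCollect xs ev = ev ++ (xs.take (40 - ev.length)).map pvLine := by
  induction xs generalizing ev with
  | nil => simp [pvCollect]
  | cons line rest ih =>
    by_cases h40 : ev.length = 40
    · simp [pvCollect, h40]
    · have hlt : ev.length < 40 := lt_of_le_of_ne h h40
      have hk : 40 - ev.length = (40 - (ev.length + 1)) + 1 := by omega
      rw [pvCollect]
      simp only [h40, if_false]
      rw [ih _ (by simp; omega)]
      simp [pvLine, hk, List.take_succ_cons]

-- B's cascade-free classification agrees with A's if/elif cascade (same order).
theorem pv_icon_eq (msg : String) :
    (if PySem.Str.isIn "Schritt 1/4" msg then "📂"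
        else if PySem.Str.isIn "Schritt 2/4" msg then "🔍"
        else if PySem.Str.isIn "Schritt 3/4" msg then "📋"
        else if PySem.Str.isIn "Schritt 4/4" msg then "📝"
        else if PySem.Str.isIn "REVIEW" msg then "🔎"
        else if PySem.Str.isIn "Skeptiker" msg then "⚔️"
        else if PySem.Str.isIn "abgeschlossen" msg then "✅"
        else "ℹ️") = pvIconFind msg pvTable := by
  simp only [pvTable, pvIconFind]

theorem extract_timeline_py_eq (logs : List String) :
    extract_timeline_py logs = extract_timeline_py_alt logs := by
  unfold extract_timeline_py extract_timeline_py_alt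
  rw [PySem.List.foldl_append_singleton_eq_map,
      PySem.List.slice_from_neg_ofNat _ 40 (by omega),
      pvCollect_eq _ _ (by simp)]
  simp only [List.nil_append, List.length_nil, Nat.sub_zero]
  rw [List.length_map, ← List.map_drop, ← List.map_reverse,
      List.take_reverse, List.reverse_reverse]
  refine List.map_congr_left (fun line _ => ?_)
  simp only [pvLine, pv_icon_eq]

-- ===== VERDICT (by name: the statement is the Claim_ definition above) =====
theorem extract_timeline_py_spec : Claim_equal_extract_timeline_py := by
  intro logs _
  unfold Spec_extract_timeline_py
  exact extract_timeline_py_eq logs
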